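-- pv_equiv track=rewrite | github.com/ThanhTuyen-0101/C-Karo | ai/LogicAi.py | generate_legal_moves
-- ===== SOURCE A (Python) =====
-- SIZE = 15        # Kích thước bàn cờ 15x15
--
-- EMPTY = 0        # Ô trống
--
-- X = 1            # Quân X (người chơi)
--
-- def generate_legal_moves(board, radius=4):
--     """
--     Sinh danh sách nước đi hợp lệ (r, c).
--
--     - Chỉ sinh ô trống trong vùng bao quanh quân đã đánh + 'radius' ô.
--     - Bàn trống -> mọi ô trống đều hợp lệ.
--     - Sắp xếp: ưu tiên nước gần QUÂN NGƯỜI (X) trước để AI dễ chọn.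
--     """
--     size = len(board)
--     has_stone = False
--     min_r, max_r = size, -1
--     min_c, max_c = size, -1
--
--     # Tìm bounding box chứa tất cả quân
--     for r in range(size):
--         for c in range(size):
--             if board[r][c] != EMPTY:
--                 has_stone = True
--                 min_r = min(min_r, r)
--                 max_r = max(max_r, r)
--                 min_c = min(min_c, c)
--                 max_c = max(max_c, c)
--
--     moves = []
--
--     # Bàn trống -> cho phép mọi ô trống
--     if not has_stone:
--         for r in range(size):
--             for c in range(size):
--                 if board[r][c] == EMPTY:
--                     moves.append((r, c))
--         return moves
--
--     # Mở rộng vùng quanh quân đã đánh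
--     min_r = max(0, min_r - radius)
--     max_r = min(size - 1, max_r + radius)
--     min_c = max(0, min_c - radius)
--     max_c = min(size - 1, max_c + radius)
--
--     for r in range(min_r, max_r + 1):
--         for c in range(min_c, max_c + 1):
--             if board[r][c] == EMPTY:
--                 moves.append((r, c))
--
--     # ƯU TIÊN GẦN QUÂN NGƯỜI (X)
--     opp_cells = [(r, c) for r in range(size) for c in range(size)
--                  if board[r][c] == X]
--
--     if opp_cells:
--         def dist_to_opp(m):
--             r, c = m
--             return min(abs(r - orr) + abs(c - occ) for orr, occ in opp_cells)
--         moves.sort(key=dist_to_opp)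
--     else:
--         # Nếu chưa có quân người -> ưu tiên gần tâm
--         center = SIZE // 2
--         moves.sort(key=lambda m: abs(m[0] - center) + abs(m[1] - center))
--
--     return moves
-- ===== SOURCE B (Python) =====
-- SIZE = 15
-- EMPTY = 0
-- X = 1
--
-- def _sweep(vals):
--     """One directional pass: out[i] = min over j<=i of (i-j) + vals[j], None = infinity."""
--     out = []
--     best = None
--     for v in vals:
--         if best is not None:
--             best += 1
--         if v is not None and (best is None or v < best):
--             best = v
--         out.append(best)
--     return out
--
-- def _transform(vals):
--     """1-D L1 distance transform: out[i] = min over j of |i-j| + vals[j], None = infinity."""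
--     fwd = _sweep(vals)
--     bwd = _sweep(vals[::-1])[::-1]
--     return [a if b is None or (a is not None and a <= b) else b
--             for a, b in zip(fwd, bwd)]
--
-- def generate_legal_moves(board, radius=4):
--     size = len(board)
--     stones = [(r, c) for r in range(size) for c in range(size) if board[r][c] != EMPTY]
--
--     if not stones:
--         return [(r, c) for r in range(size) for c in range(size)]
--
--     lo_r = max(0, min(r for r, _ in stones) - radius)
--     hi_r = min(size - 1, max(r for r, _ in stones) + radius)
--     lo_c = max(0, min(c for _, c in stones) - radius)
--     hi_c = min(size - 1, max(c for _, c in stones) + radius)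
--
--     moves = [(r, c) for r in range(lo_r, hi_r + 1) for c in range(lo_c, hi_c + 1)
--              if board[r][c] == EMPTY]
--
--     if any(board[r][c] == X for r, c in stones):
--         # separable L1 distance transform: rows, then columns
--         rowmin = [_transform([0 if board[r][c] == X else None for c in range(size)])
--                   for r in range(size)]
--         colmin = [_transform([rowmin[r][c] for r in range(size)]) for c in range(size)]
--         moves.sort(key=lambda m: colmin[m[1]][m[0]])
--     else:
--         center = SIZE // 2
--         moves.sort(key=lambda m: abs(m[0] - center) + abs(m[1] - center))
--     return moves
-- ===== Notes on version B (the rewrite author's own statement) =====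
-- stated objective: alternative
-- what changed: Instead of computing each move's sort key by scanning every player stone (min over all stones per move), B precomputes all minimal Manhattan distances at once with a separable two-pass 1-D L1 distance transform over rows then columns, and gathers the stones/bounding box by comprehensions with min()/max(); the stable sort is unchanged.
import Mathlib
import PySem

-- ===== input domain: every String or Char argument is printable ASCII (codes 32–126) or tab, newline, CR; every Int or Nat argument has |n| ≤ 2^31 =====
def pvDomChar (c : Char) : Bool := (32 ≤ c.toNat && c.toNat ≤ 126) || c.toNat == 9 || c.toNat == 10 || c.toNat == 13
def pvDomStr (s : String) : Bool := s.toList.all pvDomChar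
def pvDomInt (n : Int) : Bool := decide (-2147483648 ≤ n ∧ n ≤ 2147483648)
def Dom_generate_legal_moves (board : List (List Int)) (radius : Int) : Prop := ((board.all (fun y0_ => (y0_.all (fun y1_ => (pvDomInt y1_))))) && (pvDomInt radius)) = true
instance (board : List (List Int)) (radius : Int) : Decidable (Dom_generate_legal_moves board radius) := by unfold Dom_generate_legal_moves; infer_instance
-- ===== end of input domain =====

-- B replaces A's per-move scan over all player stones (a min over the stone list for each
-- candidate move) by a separable two-pass L1 distance transform computed once, followed by
-- the same stable sort: an alternative algorithm for the same exact result.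

-- ===== PORT A =====
def generate_legal_moves (board : List (List Int)) (radius : Int) : List (Int × Int) :=
  let size : Int := (board.length : Int)
  -- bounding-box scan: state (has_stone, min_r, max_r, min_c, max_c)
  let st :=
    (PySem.List.pyRange 0 size 1).foldl (fun (s : Bool × Int × Int × Int × Int) r =>
      (PySem.List.pyRange 0 size 1).foldl (fun (s : Bool × Int × Int × Int × Int) c =>
        if PySem.List.pyGetD (PySem.List.pyGetD board r []) c 0 ≠ 0 then
          (true, min s.2.1 r, max s.2.2.1 r, min s.2.2.2.1 c, max s.2.2.2.2 c)
        else s) s)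
      (false, size, -1, size, -1)
  if !st.1 then
    (PySem.List.pyRange 0 size 1).foldl (fun acc r =>
      (PySem.List.pyRange 0 size 1).foldl (fun acc c =>
        if PySem.List.pyGetD (PySem.List.pyGetD board r []) c 0 = 0 then acc ++ [(r, c)] else acc) acc) []
  else
    let min_r := max 0 (st.2.1 - radius)
    let max_r := min (size - 1) (st.2.2.1 + radius)
    let min_c := max 0 (st.2.2.2.1 - radius)
    let max_c := min (size - 1) (st.2.2.2.2 + radius)
    let moves := (PySem.List.pyRange min_r (max_r + 1) 1).foldl (fun acc r =>
      (PySem.List.pyRange min_c (max_c + 1) 1).foldl (fun acc c =>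
        if PySem.List.pyGetD (PySem.List.pyGetD board r []) c 0 = 0 then acc ++ [(r, c)] else acc) acc) []
    let opp_cells := (PySem.List.pyRange 0 size 1).flatMap (fun r =>
      ((PySem.List.pyRange 0 size 1).filter (fun c =>
        PySem.List.pyGetD (PySem.List.pyGetD board r []) c 0 = 1)).map (fun c => (r, c)))
    if opp_cells ≠ [] then
      -- min(...) over the (nonempty, guarded by the branch) generator; .getD 0 is unreachable
      PySem.List.sorted moves (fun m =>
        (PySem.List.min? (opp_cells.map (fun (oc : Int × Int) => |m.1 - oc.1| + |m.2 - oc.2|)) (fun x => x)).getD 0) false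
    else
      let center := PySem.Int.floordiv 15 2
      PySem.List.sorted moves (fun m => |m.1 - center| + |m.2 - center|) false

-- ===== PORT B =====
-- helpers = Source B's _sweep / _transform (None = infinity is Option Int = none)
def pvOsucc (o : Option Int) : Option Int := o.map (fun t => t + 1)

def pvSweepStep (best v : Option Int) : Option Int :=
  match pvOsucc best, v with
  | b, none => b
  | none, some x => some x
  | some y, some x => if x < y then some x else some y

def pvSweep (vals : List (Option Int)) : List (Option Int) :=
  (vals.foldl (fun (p : List (Option Int) × Option Int) v =>
    let b := pvSweepStep p.2 v
    (p.1 ++ [b], b)) ([], none)).1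

-- Source B: a if b is None or (a is not None and a <= b) else b
def pvOmin2 (a b : Option Int) : Option Int :=
  match a, b with
  | a, none => a
  | none, some y => some y
  | some x, some y => if x ≤ y then some x else some y

def pvTransform (vals : List (Option Int)) : List (Option Int) :=
  List.zipWith pvOmin2 (pvSweep vals) ((pvSweep vals.reverse).reverse)

def generate_legal_moves_alt (board : List (List Int)) (radius : Int) : List (Int × Int) :=
  let size : Int := (board.length : Int)
  let stones := (PySem.List.pyRange 0 size 1).flatMap (fun r =>
    ((PySem.List.pyRange 0 size 1).filter (fun c =>
      PySem.List.pyGetD (PySem.List.pyGetD board r []) c 0 ≠ 0)).map (fun c => (r, c)))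
  if stones = [] then
    (PySem.List.pyRange 0 size 1).flatMap (fun r =>
      (PySem.List.pyRange 0 size 1).map (fun c => (r, c)))
  else
    -- min()/max() over the nonempty generators; .getD 0 is unreachable
    let lo_r := max 0 ((PySem.List.min? (stones.map (fun (s : Int × Int) => s.1)) (fun x => x)).getD 0 - radius)
    let hi_r := min (size - 1) ((PySem.List.max? (stones.map (fun (s : Int × Int) => s.1)) (fun x => x)).getD 0 + radius)
    let lo_c := max 0 ((PySem.List.min? (stones.map (fun (s : Int × Int) => s.2)) (fun x => x)).getD 0 - radius)
    let hi_c := min (size - 1) ((PySem.List.max? (stones.map (fun (s : Int × Int) => s.2)) (fun x => x)).getD 0 + radius)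
    let moves := (PySem.List.pyRange lo_r (hi_r + 1) 1).flatMap (fun r =>
      ((PySem.List.pyRange lo_c (hi_c + 1) 1).filter (fun c =>
        PySem.List.pyGetD (PySem.List.pyGetD board r []) c 0 = 0)).map (fun c => (r, c)))
    if stones.any (fun (s : Int × Int) => PySem.List.pyGetD (PySem.List.pyGetD board s.1 []) s.2 0 = 1) then
      let rowmin := (PySem.List.pyRange 0 size 1).map (fun r =>
        pvTransform ((PySem.List.pyRange 0 size 1).map (fun c =>
          if PySem.List.pyGetD (PySem.List.pyGetD board r []) c 0 = 1 then some 0 else none)))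
      let colmin := (PySem.List.pyRange 0 size 1).map (fun c =>
        pvTransform ((PySem.List.pyRange 0 size 1).map (fun r =>
          PySem.List.pyGetD (PySem.List.pyGetD rowmin r []) c none)))
      -- colmin[m.2][m.1] is an int (never None) whenever an X stone exists; .getD 0 extracts it
      PySem.List.sorted moves (fun m =>
        (PySem.List.pyGetD (PySem.List.pyGetD colmin m.2 []) m.1 none).getD 0) false
    else
      let center := PySem.Int.floordiv 15 2
      PySem.List.sorted moves (fun m => |m.1 - center| + |m.2 - center|) false

-- ===== PRECONDITION & SPEC =====
-- Pre_ excludes ragged boards with a row shorter than the board's height: there Python A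
-- indexes board[r][c] for c up to len(board)-1 and raises IndexError.
def Pre_generate_legal_moves (board : List (List Int)) (radius : Int) : Prop :=
  ∀ row ∈ board, board.length ≤ row.length
instance (board : List (List Int)) (radius : Int) : Decidable (Pre_generate_legal_moves board radius) := by
  unfold Pre_generate_legal_moves; infer_instance

def pvWitness_generate_legal_moves : List (List Int) × Int := ([[0, 1], [0, 0]], 4)

def Spec_generate_legal_moves (board : List (List Int)) (radius : Int) (out : List (Int × Int)) : Prop := out = generate_legal_moves_alt board radius
instance (board : List (List Int)) (radius : Int) (out : List (Int × Int)) : Decidable (Spec_generate_legal_moves board radius out) := by unfold Spec_generate_legal_moves; infer_instance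

-- ===== CLAIM (what is proved, stated in full; the proofs are below) =====
def Claim_equal_generate_legal_moves : Prop := ∀ (board : List (List Int)) (radius : Int), Dom_generate_legal_moves board radius → Pre_generate_legal_moves board radius → Spec_generate_legal_moves board radius (generate_legal_moves board radius)


-- ===== LEMMAS AND PROOFS =====

-- ---- option-valued minimum (none = +infinity) ----
def oMinD (a b : Option Int) : Option Int :=
  match a, b with
  | a, none => a
  | none, some y => some y
  | some x, some y => some (min x y)

def oAdd (k : Int) (o : Option Int) : Option Int := o.map (fun t => t + k)

theorem pvSweepStep_eq (best v : Option Int) : pvSweepStep best v = oMinD v (oAdd 1 best) := by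
  cases best <;> cases v <;> simp [pvSweepStep, pvOsucc, oMinD, oAdd, min_def] <;>
    (try split) <;> simp_all <;> omega

theorem pvOmin2_eq (a b : Option Int) : pvOmin2 a b = oMinD a b := by
  cases a <;> cases b <;> simp [pvOmin2, oMinD, min_def] <;> split <;> simp

theorem oAdd_none (k : Int) : oAdd k none = none := rfl
theorem oMinD_none_left (b : Option Int) : oMinD none b = b := by cases b <;> rfl

-- ---- "o is the minimum of the set P" ----
def IsMinOf (o : Option Int) (P : Int → Prop) : Prop :=
  (∀ m, o = some m → P m ∧ ∀ x, P x → m ≤ x) ∧ (o = none → ∀ x, ¬ P x)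

theorem IsMinOf_unique {o o' : Option Int} {P : Int → Prop}
    (h : IsMinOf o P) (h' : IsMinOf o' P) : o = o' := by
  cases o with
  | none =>
    cases o' with
    | none => rfl
    | some m' => exact absurd (h'.1 m' rfl).1 (h.2 rfl m')
  | some m =>
    cases o' with
    | none => exact absurd (h.1 m rfl).1 (h'.2 rfl m)
    | some m' =>
      have h1 := h.1 m rfl
      have h2 := h'.1 m' rfl
      have := h1.2 m' h2.1
      have := h2.2 m h1.1
      simp; omega

theorem IsMinOf_congr {o : Option Int} {P Q : Int → Prop}
    (hpq : ∀ x, P x ↔ Q x) (h : IsMinOf o P) : IsMinOf o Q := by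
  constructor
  · intro m hm
    obtain ⟨h1, h2⟩ := h.1 m hm
    exact ⟨(hpq m).1 h1, fun x hx => h2 x ((hpq x).2 hx)⟩
  · intro hn x hx
    exact h.2 hn x ((hpq x).2 hx)

theorem oMinD_isMin {a b : Option Int} {P Q : Int → Prop}
    (ha : IsMinOf a P) (hb : IsMinOf b Q) : IsMinOf (oMinD a b) (fun x => P x ∨ Q x) := by
  cases a with
  | none =>
    rw [oMinD_none_left]
    constructor
    · intro m hm
      obtain ⟨h1, h2⟩ := hb.1 m hm
      refine ⟨Or.inr h1, fun x hx => ?_⟩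
      rcases hx with hx | hx
      · exact absurd hx (ha.2 rfl x)
      · exact h2 x hx
    · intro hn x hx
      rcases hx with hx | hx
      · exact ha.2 rfl x hx
      · exact hb.2 hn x hx
  | some ma =>
    cases b with
    | none =>
      have : oMinD (some ma) none = some ma := rfl
      rw [this]
      constructor
      · intro m hm
        obtain rfl : ma = m := by simpa using hm
        obtain ⟨h1, h2⟩ := ha.1 ma rfl
        refine ⟨Or.inl h1, fun x hx => ?_⟩
        rcases hx with hx | hx
        · exact h2 x hx
        · exact absurd hx (hb.2 rfl x)
      · intro hn; simp at hn
    | some mb =>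
      have : oMinD (some ma) (some mb) = some (min ma mb) := rfl
      rw [this]
      constructor
      · intro m hm
        obtain rfl : min ma mb = m := by simpa using hm
        obtain ⟨ha1, ha2⟩ := ha.1 ma rfl
        obtain ⟨hb1, hb2⟩ := hb.1 mb rfl
        constructor
        · rcases le_total ma mb with hle | hle
          · rw [min_eq_left hle]; exact Or.inl ha1
          · rw [min_eq_right hle]; exact Or.inr hb1
        · intro x hx
          rcases hx with hx | hx
          · exact le_trans (min_le_left _ _) (ha2 x hx)
          · exact le_trans (min_le_right _ _) (hb2 x hx)
      · intro hn; simp at hn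

theorem oAdd_isMin {o : Option Int} {P : Int → Prop} (k : Int)
    (h : IsMinOf o P) : IsMinOf (oAdd k o) (fun x => ∃ y, P y ∧ x = y + k) := by
  cases o with
  | none =>
    rw [oAdd_none]
    refine ⟨by intro m hm; simp at hm, ?_⟩
    rintro _ x ⟨y, hy, _⟩
    exact h.2 rfl y hy
  | some m =>
    have : oAdd k (some m) = some (m + k) := rfl
    rw [this]
    constructor
    · intro m' hm'
      obtain rfl : m + k = m' := by simpa using hm'
      obtain ⟨h1, h2⟩ := h.1 m rfl
      exact ⟨⟨m, h1, rfl⟩, by rintro x ⟨y, hy, rfl⟩; have := h2 y hy; omega⟩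
    · intro hn; simp at hn

theorem single_isMin (o : Option Int) : IsMinOf o (fun x => o = some x) := by
  cases o with
  | none => exact ⟨by intro m hm; simp at hm, by intro _ x hx; simp at hx⟩
  | some m =>
    constructor
    · intro m' hm'
      obtain rfl : m = m' := by simpa using hm'
      refine ⟨rfl, fun x hx => ?_⟩
      obtain rfl : m = x := by simpa using hx
      omega
    · intro hn; simp at hn

-- replace one side of a union by another set with the same minimum
theorem min_union_congr {a o : Option Int} {P P' Q : Int → Prop}
    (haP : IsMinOf a P) (haP' : IsMinOf a P')
    (h : IsMinOf o (fun x => P x ∨ Q x)) : IsMinOf o (fun x => P' x ∨ Q x) := by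
  constructor
  · intro m hm
    obtain ⟨h1, h2⟩ := h.1 m hm
    constructor
    · rcases h1 with h1 | h1
      · -- m ∈ P; show m ∈ P'
        cases a with
        | none => exact absurd h1 (haP.2 rfl m)
        | some am =>
          obtain ⟨hamP, hamLB⟩ := haP.1 am rfl
          obtain ⟨hamP', _⟩ := haP'.1 am rfl
          have h3 : m ≤ am := h2 am (Or.inl hamP)
          have h4 : am ≤ m := hamLB m h1
          have : am = m := le_antisymm h4 h3
          exact Or.inl (this ▸ hamP')
      · exact Or.inr h1
    · intro x hx
      rcases hx with hx | hx
      · cases a with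
        | none => exact absurd hx (haP'.2 rfl x)
        | some am =>
          obtain ⟨hamP, _⟩ := haP.1 am rfl
          obtain ⟨_, hamLB'⟩ := haP'.1 am rfl
          exact le_trans (h2 am (Or.inl hamP)) (hamLB' x hx)
      · exact h2 x (Or.inr hx)
  · intro hn x hx
    rcases hx with hx | hx
    · cases a with
      | none => exact haP'.2 rfl x hx
      | some am =>
        obtain ⟨hamP, _⟩ := haP.1 am rfl
        exact h.2 hn am (Or.inl hamP)
    · exact h.2 hn x (Or.inr hx)


-- ---- the 1-D sweep and transform ----
def sweepRec (best : Option Int) : List (Option Int) → List (Option Int)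
  | [] => []
  | v :: t => pvSweepStep best v :: sweepRec (pvSweepStep best v) t

theorem pvSweep_loop (v : List (Option Int)) : ∀ (acc : List (Option Int)) (best : Option Int),
    (v.foldl (fun (p : List (Option Int) × Option Int) w =>
      let b := pvSweepStep p.2 w
      (p.1 ++ [b], b)) (acc, best)).1 = acc ++ sweepRec best v := by
  induction v with
  | nil => intro acc best; simp [sweepRec]
  | cons v0 t ih =>
    intro acc best
    simp only [List.foldl_cons, sweepRec]
    rw [ih]
    simp

theorem pvSweep_eq (v : List (Option Int)) : pvSweep v = sweepRec none v := by
  unfold pvSweep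
  have := pvSweep_loop v [] none
  simpa using this

theorem length_sweepRec (v : List (Option Int)) : ∀ best, (sweepRec best v).length = v.length := by
  induction v with
  | nil => intro best; rfl
  | cons v0 t ih => intro best; simp [sweepRec, ih]

theorem abs_sub_of_le {a b : Int} (h : b ≤ a) : |a - b| = a - b := abs_of_nonneg (by omega)
theorem abs_sub_of_ge {a b : Int} (h : a ≤ b) : |a - b| = b - a := by
  rw [abs_sub_comm]; exact abs_of_nonneg (by omega)

theorem sweepRec_isMin : ∀ (v : List (Option Int)) (best : Option Int) (i : Nat), i < v.length →
    IsMinOf ((sweepRec best v).getD i none)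
      (fun x => (∃ t, best = some t ∧ x = t + ((i : Int) + 1)) ∨
                (∃ j, j ≤ i ∧ ∃ t, v.getD j none = some t ∧ x = t + ((i : Int) - (j : Int)))) := by
  intro v
  induction v with
  | nil => intro best i hi; simp at hi
  | cons v0 t ih =>
    intro best i hi
    cases i with
    | zero =>
      simp only [sweepRec, List.getD_cons_zero, pvSweepStep_eq]
      have hu := oMinD_isMin (single_isMin v0) (oAdd_isMin 1 (single_isMin best))
      refine IsMinOf_congr (fun x => ?_) hu
      constructor
      · rintro (h | ⟨y, hy, rfl⟩)
        · exact Or.inr ⟨0, le_refl 0, x, h.symm ▸ rfl, by simp⟩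
        · exact Or.inl ⟨y, hy, by push_cast; ring⟩
      · rintro (⟨t0, ht0, rfl⟩ | ⟨j, hj, t0, ht0, rfl⟩)
        · exact Or.inr ⟨t0, ht0, by push_cast; ring⟩
        · interval_cases j
          simp only [List.getD_cons_zero] at ht0
          left; rw [ht0]; simp
    | succ i =>
      simp only [sweepRec, List.getD_cons_succ]
      have hit : i < t.length := by simpa using hi
      have IH := ih (pvSweepStep best v0) i hit
      -- replace the carried minimum by the set it is the minimum of
      have hb' : IsMinOf (pvSweepStep best v0)
          (fun x => v0 = some x ∨ ∃ y, best = some y ∧ x = y + 1) := by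
        rw [pvSweepStep_eq]
        exact oMinD_isMin (single_isMin v0) (oAdd_isMin 1 (single_isMin best))
      have haP : IsMinOf (oAdd ((i : Int) + 1) (pvSweepStep best v0))
          (fun x => ∃ t0, pvSweepStep best v0 = some t0 ∧ x = t0 + ((i : Int) + 1)) := by
        refine IsMinOf_congr (fun x => ?_) (oAdd_isMin ((i : Int) + 1) (single_isMin (pvSweepStep best v0)))
        constructor
        · rintro ⟨y, hy, rfl⟩; exact ⟨y, hy, rfl⟩
        · rintro ⟨y, hy, rfl⟩; exact ⟨y, hy, rfl⟩
      have haP' : IsMinOf (oAdd ((i : Int) + 1) (pvSweepStep best v0))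
          (fun x => (∃ y, best = some y ∧ x = y + ((i : Int) + 2)) ∨
                    (∃ y, v0 = some y ∧ x = y + ((i : Int) + 1))) := by
        refine IsMinOf_congr (fun x => ?_) (oAdd_isMin ((i : Int) + 1) hb')
        constructor
        · rintro ⟨z, hz | ⟨y, hy, rfl⟩, rfl⟩
          · exact Or.inr ⟨z, hz, rfl⟩
          · exact Or.inl ⟨y, hy, by ring⟩
        · rintro (⟨y, hy, rfl⟩ | ⟨y, hy, rfl⟩)
          · exact ⟨y + 1, Or.inr ⟨y, hy, rfl⟩, by ring⟩
          · exact ⟨y, Or.inl hy, rfl⟩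
      have hrepl := min_union_congr haP haP' IH
      refine IsMinOf_congr (fun x => ?_) hrepl
      constructor
      · rintro ((⟨y, hy, rfl⟩ | ⟨y, hy, rfl⟩) | ⟨j, hj, t0, ht0, rfl⟩)
        · exact Or.inl ⟨y, hy, by push_cast; ring⟩
        · refine Or.inr ⟨0, by omega, y, by simpa using hy, ?_⟩
          push_cast; ring
        · refine Or.inr ⟨j + 1, by omega, t0, by simpa using ht0, ?_⟩
          push_cast; ring
      · rintro (⟨y, hy, rfl⟩ | ⟨j, hj, t0, ht0, rfl⟩)
        · exact Or.inl (Or.inl ⟨y, hy, by push_cast; ring⟩)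
        · cases j with
          | zero =>
            simp only [List.getD_cons_zero] at ht0
            exact Or.inl (Or.inr ⟨t0, ht0, by push_cast; ring⟩)
          | succ k =>
            simp only [List.getD_cons_succ] at ht0
            refine Or.inr ⟨k, by omega, t0, ht0, ?_⟩
            push_cast; ring

theorem getD_reverse (v : List (Option Int)) (j : Nat) (h : j < v.length) :
    v.reverse.getD j none = v.getD (v.length - 1 - j) none := by
  rw [List.getD_eq_getElem?_getD, List.getD_eq_getElem?_getD, List.getElem?_reverse h]

theorem zipWith_getD (f : Option Int → Option Int → Option Int) (l1 l2 : List (Option Int))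
    (i : Nat) (h1 : i < l1.length) (h2 : i < l2.length) :
    (List.zipWith f l1 l2).getD i none = f (l1.getD i none) (l2.getD i none) := by
  have hz : i < (List.zipWith f l1 l2).length := by simp [List.length_zipWith]; omega
  rw [List.getD_eq_getElem _ _ hz, List.getD_eq_getElem _ _ h1, List.getD_eq_getElem _ _ h2]
  exact List.getElem_zipWith

theorem pvTransform_isMin (v : List (Option Int)) (i : Nat) (hi : i < v.length) :
    IsMinOf ((pvTransform v).getD i none)
      (fun x => ∃ j, j < v.length ∧ ∃ t, v.getD j none = some t ∧
        x = t + |(i : Int) - (j : Int)|) := by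
  have hlf : (pvSweep v).length = v.length := by rw [pvSweep_eq, length_sweepRec]
  have hlb : ((pvSweep v.reverse).reverse).length = v.length := by
    simp [pvSweep_eq, length_sweepRec]
  unfold pvTransform
  rw [zipWith_getD _ _ _ i (by omega) (by omega), pvOmin2_eq]
  -- forward part
  have hf := sweepRec_isMin v none i hi
  have hf' : IsMinOf ((pvSweep v).getD i none)
      (fun x => ∃ j, j ≤ i ∧ ∃ t, v.getD j none = some t ∧ x = t + ((i : Int) - (j : Int))) := by
    rw [pvSweep_eq]
    refine IsMinOf_congr (fun x => ?_) hf
    constructor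
    · rintro (⟨y, hy, _⟩ | h)
      · simp at hy
      · exact h
    · intro h; exact Or.inr h
  -- backward part
  have hrl : (v.reverse).length = v.length := by simp
  have hni : v.length - 1 - i < v.reverse.length := by omega
  have hb := sweepRec_isMin v.reverse none (v.length - 1 - i) hni
  have hbidx : ((pvSweep v.reverse).reverse).getD i none
      = (sweepRec none v.reverse).getD (v.length - 1 - i) none := by
    rw [pvSweep_eq]
    have := getD_reverse (sweepRec none v.reverse) i
      (by rw [length_sweepRec]; omega)
    rw [this]
    congr 1
    rw [length_sweepRec]
    simp
  have hb' : IsMinOf (((pvSweep v.reverse).reverse).getD i none)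
      (fun x => ∃ k, i ≤ k ∧ k < v.length ∧ ∃ t, v.getD k none = some t ∧
        x = t + ((k : Int) - (i : Int))) := by
    rw [hbidx]
    refine IsMinOf_congr (fun x => ?_) hb
    constructor
    · rintro (⟨y, hy, _⟩ | ⟨j, hj, t0, ht0, rfl⟩)
      · simp at hy
      · have hjlt : j < v.length := by omega
        rw [getD_reverse v j (by simpa using hjlt)] at ht0
        refine ⟨v.length - 1 - j, by omega, by omega, t0, by simpa using ht0, ?_⟩
        have h1 : ((v.length - 1 - i : Nat) : Int) = (v.length : Int) - 1 - i := by omega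
        have h2 : ((v.length - 1 - j : Nat) : Int) = (v.length : Int) - 1 - j := by omega
        rw [h1, h2]
        ring
    · rintro ⟨k, hik, hk, t0, ht0, rfl⟩
      refine Or.inr ⟨v.length - 1 - k, by omega, t0, ?_, ?_⟩
      · rw [getD_reverse v (v.length - 1 - k) (by omega)]
        have heq : v.length - 1 - (v.length - 1 - k) = k := by omega
        rw [heq]
        exact ht0
      · have h1 : ((v.length - 1 - i : Nat) : Int) = (v.length : Int) - 1 - i := by omega
        have h2 : ((v.length - 1 - k : Nat) : Int) = (v.length : Int) - 1 - k := by omega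
        rw [h1, h2]
        ring
  have hu := oMinD_isMin hf' hb'
  refine IsMinOf_congr (fun x => ?_) hu
  constructor
  · rintro (⟨j, hj, t0, ht0, rfl⟩ | ⟨k, hik, hk, t0, ht0, rfl⟩)
    · refine ⟨j, by omega, t0, ht0, ?_⟩
      rw [abs_sub_of_le (by exact_mod_cast Nat.cast_le.mpr hj)]
    · refine ⟨k, hk, t0, ht0, ?_⟩
      rw [abs_sub_of_ge (by exact_mod_cast Nat.cast_le.mpr hik)]
  · rintro ⟨j, hj, t0, ht0, rfl⟩
    by_cases hle : j ≤ i
    · refine Or.inl ⟨j, hle, t0, ht0, ?_⟩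
      rw [abs_sub_of_le (by exact_mod_cast Nat.cast_le.mpr hle)]
    · refine Or.inr ⟨j, by omega, hj, t0, ht0, ?_⟩
      rw [abs_sub_of_ge (by exact_mod_cast Nat.cast_le.mpr (by omega : i ≤ j))]

-- ---- 2-D composition: rows then columns gives min Manhattan distance to X stones ----
def cellN (board : List (List Int)) (r c : Nat) : Int := (board.getD r []).getD c 0

def srcRow (board : List (List Int)) (r : Nat) : List (Option Int) :=
  (List.range board.length).map (fun c => if cellN board r c = 1 then some 0 else none)

def rowT (board : List (List Int)) (r : Nat) : List (Option Int) := pvTransform (srcRow board r)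

def colT (board : List (List Int)) (c : Nat) : List (Option Int) :=
  pvTransform ((List.range board.length).map (fun r => (rowT board r).getD c none))

theorem getD_map_range {α : Type} (f : Nat → α) (n j : Nat) (d : α) (hj : j < n) :
    ((List.range n).map f).getD j d = f j := by
  rw [List.getD_eq_getElem _ _ (by simpa using hj)]
  simp

theorem row_isMin (board : List (List Int)) (r c : Nat) (hc : c < board.length) :
    IsMinOf ((rowT board r).getD c none)
      (fun x => ∃ b, b < board.length ∧ cellN board r b = 1 ∧ x = |(c : Int) - (b : Int)|) := by
  have hlen : (srcRow board r).length = board.length := by simp [srcRow]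
  have h := pvTransform_isMin (srcRow board r) c (by omega)
  refine IsMinOf_congr (fun x => ?_) h
  constructor
  · rintro ⟨j, hj, t0, ht0, rfl⟩
    rw [hlen] at hj
    rw [srcRow, getD_map_range _ _ _ _ hj] at ht0
    by_cases hx : cellN board r j = 1
    · rw [if_pos hx] at ht0
      obtain rfl : (0 : Int) = t0 := by simpa using ht0
      exact ⟨j, hj, hx, by ring⟩
    · rw [if_neg hx] at ht0; simp at ht0
  · rintro ⟨b, hb, hx, rfl⟩
    refine ⟨b, by omega, 0, ?_, by ring⟩
    rw [srcRow, getD_map_range _ _ _ _ hb, if_pos hx]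

theorem col_isMin (board : List (List Int)) (r c : Nat)
    (hr : r < board.length) (hc : c < board.length) :
    IsMinOf ((colT board c).getD r none)
      (fun x => ∃ a, a < board.length ∧ ∃ b, b < board.length ∧ cellN board a b = 1 ∧
        x = |(r : Int) - (a : Int)| + |(c : Int) - (b : Int)|) := by
  have hlen : ((List.range board.length).map (fun a => (rowT board a).getD c none)).length
      = board.length := by simp
  have h := pvTransform_isMin _ r (by rw [hlen]; omega)
  rw [colT]
  -- h is the min over the column entries; compose with row_isMin
  constructor
  · intro m hm
    obtain ⟨h1, h2⟩ := h.1 m hm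
    obtain ⟨a, ha, t0, ht0, hmeq⟩ := h1
    rw [hlen] at ha
    rw [getD_map_range _ _ _ _ ha] at ht0
    have hrow := row_isMin board a c hc
    obtain ⟨⟨b, hb, hxb, hteq⟩, hlb⟩ := hrow.1 t0 ht0
    constructor
    · exact ⟨a, ha, b, hb, hxb, by rw [hmeq, hteq]; ring⟩
    · rintro x ⟨a', ha', b', hb', hx', rfl⟩
      -- row a' has an X stone, so its row-min is finite and ≤ |c - b'|
      have hrow' := row_isMin board a' c hc
      have hne : (rowT board a').getD c none ≠ none := by
        intro hnone
        exact hrow'.2 hnone |((c : Int) - (b' : Int))| ⟨b', hb', hx', rfl⟩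
      obtain ⟨t', ht'⟩ := Option.ne_none_iff_exists'.mp hne
      obtain ⟨_, hlb'⟩ := hrow'.1 t' ht'
      have h5 : t' ≤ |(c : Int) - (b' : Int)| := hlb' _ ⟨b', hb', hx', rfl⟩
      have h6 : m ≤ t' + |(r : Int) - (a' : Int)| := by
        refine h2 _ ⟨a', by omega, t', ?_, rfl⟩
        rw [getD_map_range _ _ _ _ ha']
        exact ht'
      calc m ≤ t' + |(r : Int) - (a' : Int)| := h6
        _ ≤ |(r : Int) - (a' : Int)| + |(c : Int) - (b' : Int)| := by omega
  · intro hn x hx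
    obtain ⟨a, ha, b, hb, hxb, rfl⟩ := hx
    -- row a's min is finite, giving an element of the column set: contradiction
    have hrow := row_isMin board a c hc
    have hne : (rowT board a).getD c none ≠ none := by
      intro hnone
      exact hrow.2 hnone |((c : Int) - (b : Int))| ⟨b, hb, hxb, rfl⟩
    obtain ⟨t', ht'⟩ := Option.ne_none_iff_exists'.mp hne
    refine h.2 hn (t' + |(r : Int) - (a : Int)|) ⟨a, by omega, t', ?_, rfl⟩
    rw [getD_map_range _ _ _ _ ha]
    exact ht'


theorem foldl_nested {α β γ : Type} (l1 : List α) (l2 : α → List β) (f : γ → α → β → γ)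
    (init : γ) :
    l1.foldl (fun s a => (l2 a).foldl (fun s' b => f s' a b) s) init
      = (l1.flatMap (fun a => (l2 a).map (fun b => (a, b)))).foldl (fun s ab => f s ab.1 ab.2) init := by
  induction l1 generalizing init with
  | nil => rfl
  | cons a t ih => simp [List.foldl_append, List.foldl_map, ih]

theorem foldl_append_ite {α : Type} (l : List α) (p : α → Prop) [DecidablePred p]
    (init : List α) :
    l.foldl (fun acc x => if p x then acc ++ [x] else acc) init
      = init ++ l.filter (fun x => decide (p x)) := by
  induction l generalizing init with
  | nil => simp
  | cons x t ih =>
    by_cases hx : p x <;> simp [hx, ih, List.append_assoc]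

theorem bbox_foldl (l : List (Int × Int)) (p : Int × Int → Prop) [DecidablePred p] :
    ∀ (s : Bool × Int × Int × Int × Int),
    l.foldl (fun s ab => if p ab then
        (true, min s.2.1 ab.1, max s.2.2.1 ab.1, min s.2.2.2.1 ab.2, max s.2.2.2.2 ab.2)
      else s) s
    = ((s.1 || l.any (fun x => decide (p x))),
       (l.filter (fun x => decide (p x))).foldl (fun m ab => min m ab.1) s.2.1,
       (l.filter (fun x => decide (p x))).foldl (fun m ab => max m ab.1) s.2.2.1,
       (l.filter (fun x => decide (p x))).foldl (fun m ab => min m ab.2) s.2.2.2.1,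
       (l.filter (fun x => decide (p x))).foldl (fun m ab => max m ab.2) s.2.2.2.2) := by
  induction l with
  | nil => intro s; simp
  | cons x t ih =>
    intro s
    by_cases hx : p x <;> simp [hx, ih]

theorem foldl_min_init (l : List Int) (a : Int) (hne : l ≠ []) (h : ∀ x ∈ l, x ≤ a) :
    l.foldl min a = (PySem.List.min? l (fun x => x)).getD 0 := by
  cases l with
  | nil => exact absurd rfl hne
  | cons x t =>
    rw [PySem.List.min?_id_cons]
    have hxa : min a x = x := min_eq_right (h x (by simp))
    simp [hxa]

theorem foldl_max_init (l : List Int) (a : Int) (hne : l ≠ []) (h : ∀ x ∈ l, a ≤ x) :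
    l.foldl max a = (PySem.List.max? l (fun x => x)).getD 0 := by
  cases l with
  | nil => exact absurd rfl hne
  | cons x t =>
    rw [PySem.List.max?_id_cons]
    have hxa : max a x = x := max_eq_right (h x (by simp))
    simp [hxa]

-- ---- canonical pieces ----
def pcell (board : List (List Int)) (rc : Int × Int) : Int :=
  PySem.List.pyGetD (PySem.List.pyGetD board rc.1 []) rc.2 0

def pcells (board : List (List Int)) : List (Int × Int) :=
  (PySem.List.pyRange 0 (board.length : Int) 1).flatMap (fun r =>
    (PySem.List.pyRange 0 (board.length : Int) 1).map (fun c => (r, c)))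

def stonesL (board : List (List Int)) : List (Int × Int) :=
  (pcells board).filter (fun rc => decide (pcell board rc ≠ 0))

def oppL (board : List (List Int)) : List (Int × Int) :=
  (pcells board).filter (fun rc => decide (pcell board rc = 1))

def loR (board : List (List Int)) (radius : Int) : Int :=
  max 0 ((PySem.List.min? ((stonesL board).map (fun s => s.1)) (fun x => x)).getD 0 - radius)
def hiR (board : List (List Int)) (radius : Int) : Int :=
  min ((board.length : Int) - 1) ((PySem.List.max? ((stonesL board).map (fun s => s.1)) (fun x => x)).getD 0 + radius)
def loC (board : List (List Int)) (radius : Int) : Int :=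
  max 0 ((PySem.List.min? ((stonesL board).map (fun s => s.2)) (fun x => x)).getD 0 - radius)
def hiC (board : List (List Int)) (radius : Int) : Int :=
  min ((board.length : Int) - 1) ((PySem.List.max? ((stonesL board).map (fun s => s.2)) (fun x => x)).getD 0 + radius)

def movesL (board : List (List Int)) (radius : Int) : List (Int × Int) :=
  ((PySem.List.pyRange (loR board radius) (hiR board radius + 1) 1).flatMap (fun r =>
    (PySem.List.pyRange (loC board radius) (hiC board radius + 1) 1).map (fun c => (r, c)))).filter
      (fun rc => decide (pcell board rc = 0))

def keyA (board : List (List Int)) (m : Int × Int) : Int :=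
  (PySem.List.min? ((oppL board).map (fun (oc : Int × Int) => |m.1 - oc.1| + |m.2 - oc.2|))
    (fun x => x)).getD 0

def keyC (m : Int × Int) : Int :=
  |m.1 - PySem.Int.floordiv 15 2| + |m.2 - PySem.Int.floordiv 15 2|

theorem mem_pcells (board : List (List Int)) (rc : Int × Int) :
    rc ∈ pcells board ↔ 0 ≤ rc.1 ∧ rc.1 < (board.length : Int) ∧ 0 ≤ rc.2 ∧ rc.2 < (board.length : Int) := by
  unfold pcells
  simp only [List.mem_flatMap, List.mem_map]
  constructor
  · rintro ⟨r, hr, c, hc, rfl⟩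
    rw [PySem.List.mem_pyRange_one] at hr hc
    exact ⟨hr.1, hr.2, hc.1, hc.2⟩
  · rintro ⟨h1, h2, h3, h4⟩
    exact ⟨rc.1, PySem.List.mem_pyRange_one.mpr ⟨h1, h2⟩, rc.2,
      PySem.List.mem_pyRange_one.mpr ⟨h3, h4⟩, rfl⟩

theorem stones_bounds (board : List (List Int)) (rc : Int × Int) (h : rc ∈ stonesL board) :
    0 ≤ rc.1 ∧ rc.1 < (board.length : Int) ∧ 0 ≤ rc.2 ∧ rc.2 < (board.length : Int) := by
  unfold stonesL at h
  exact (mem_pcells board rc).mp (List.mem_of_mem_filter h)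


theorem insertBy_congr {α : Type} (b1 b2 : α → α → Bool) (x : α) (ys : List α)
    (h : ∀ y ∈ ys, b1 x y = b2 x y) :
    PySem.List.insertBy b1 x ys = PySem.List.insertBy b2 x ys := by
  induction ys with
  | nil => rfl
  | cons y t ih =>
    simp only [PySem.List.insertBy]
    rw [h y (by simp)]
    split
    · rfl
    · rw [ih (fun z hz => h z (by simp [hz]))]

theorem sorted_congr {α : Type} (xs : List α) (k1 k2 : α → Int)
    (h : ∀ x ∈ xs, k1 x = k2 x) :
    PySem.List.sorted xs k1 false = PySem.List.sorted xs k2 false := by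
  rw [PySem.List.sorted_eq_foldl_insertBy, PySem.List.sorted_eq_foldl_insertBy]
  suffices haux : ∀ (l : List α) (acc : List α), (∀ x ∈ l, k1 x = k2 x) → (∀ y ∈ acc, k1 y = k2 y) →
      l.foldl (fun acc x => PySem.List.insertBy (fun a b => decide (k1 a < k1 b)) x acc) acc
        = l.foldl (fun acc x => PySem.List.insertBy (fun a b => decide (k2 a < k2 b)) x acc) acc by
    exact haux xs [] h (by simp)
  intro l
  induction l with
  | nil => intro acc _ _; rfl
  | cons x t ih =>
    intro acc hl hacc
    simp only [List.foldl_cons]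
    have hstep : PySem.List.insertBy (fun a b => decide (k1 a < k1 b)) x acc
        = PySem.List.insertBy (fun a b => decide (k2 a < k2 b)) x acc := by
      refine insertBy_congr _ _ x acc (fun y hy => ?_)
      rw [hl x (by simp), hacc y hy]
    rw [hstep]
    refine ih _ (fun z hz => hl z (by simp [hz])) (fun y hy => ?_)
    rw [PySem.List.mem_insertBy] at hy
    rcases hy with rfl | hy
    · exact hl y (by simp)
    · exact hacc y hy

theorem min?_id_isMin (l : List Int) :
    IsMinOf (PySem.List.min? l (fun x => x)) (fun x => x ∈ l) := by
  constructor
  · intro m hm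
    exact ⟨PySem.List.min?_mem hm, fun x hx => PySem.List.min?_isMin hm x hx⟩
  · intro hn x hx
    rw [PySem.List.min?_eq_none_iff] at hn
    subst hn
    simp at hx

theorem stones_map_fst_le (board : List (List Int)) :
    ∀ x ∈ (stonesL board).map (fun s : Int × Int => s.1), x ≤ (board.length : Int) := by
  intro x hx
  obtain ⟨ab, hab, rfl⟩ := List.mem_map.mp hx
  have := stones_bounds board ab hab
  omega

theorem stones_map_fst_ge (board : List (List Int)) :
    ∀ x ∈ (stonesL board).map (fun s : Int × Int => s.1), (-1 : Int) ≤ x := by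
  intro x hx
  obtain ⟨ab, hab, rfl⟩ := List.mem_map.mp hx
  have := stones_bounds board ab hab
  omega

theorem stones_map_snd_le (board : List (List Int)) :
    ∀ x ∈ (stonesL board).map (fun s : Int × Int => s.2), x ≤ (board.length : Int) := by
  intro x hx
  obtain ⟨ab, hab, rfl⟩ := List.mem_map.mp hx
  have := stones_bounds board ab hab
  omega

theorem stones_map_snd_ge (board : List (List Int)) :
    ∀ x ∈ (stonesL board).map (fun s : Int × Int => s.2), (-1 : Int) ≤ x := by
  intro x hx
  obtain ⟨ab, hab, rfl⟩ := List.mem_map.mp hx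
  have := stones_bounds board ab hab
  omega

theorem A_canon (board : List (List Int)) (radius : Int) :
    generate_legal_moves board radius =
      if stonesL board = [] then pcells board
      else if oppL board ≠ [] then PySem.List.sorted (movesL board radius) (keyA board) false
      else PySem.List.sorted (movesL board radius) keyC false := by
  unfold generate_legal_moves
  dsimp only
  rw [foldl_nested, bbox_foldl]
  dsimp only
  have hcells : List.flatMap (fun a => List.map (fun b => (a, b)) (PySem.List.pyRange 0 (board.length : Int)))
      (PySem.List.pyRange 0 (board.length : Int)) = pcells board := rfl
  rw [hcells]
  have hstfilter : List.filter (fun x : Int × Int =>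
      decide (PySem.List.pyGetD (PySem.List.pyGetD board x.1 []) x.2 0 ≠ 0)) (pcells board)
      = stonesL board := rfl
  rw [hstfilter]
  have hopp : List.flatMap (fun r =>
        List.map (fun c => (r, c))
          (List.filter (fun c => decide (PySem.List.pyGetD (PySem.List.pyGetD board r []) c 0 = 1))
            (PySem.List.pyRange 0 (board.length : Int))))
      (PySem.List.pyRange 0 (board.length : Int)) = oppL board := by
    unfold oppL pcells
    rw [List.filter_flatMap]
    simp only [List.filter_map, Function.comp_def, pcell]
    rfl
  rw [hopp]
  have hsiff : ((pcells board).any (fun x =>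
      decide (PySem.List.pyGetD (PySem.List.pyGetD board x.1 []) x.2 0 ≠ 0)) = false)
      ↔ stonesL board = [] := by
    rw [← hstfilter]
    rw [List.filter_eq_nil_iff, List.any_eq_false]
  have hcond : ((!((pcells board).any (fun x =>
      decide (PySem.List.pyGetD (PySem.List.pyGetD board x.1 []) x.2 0 ≠ 0)))) = true)
      ↔ stonesL board = [] := by
    rw [Bool.not_eq_true', hsiff]
  simp only [Bool.false_or]
  simp only [hcond]
  by_cases hs : stonesL board = []
  · rw [if_pos hs, if_pos hs]
    rw [foldl_nested, foldl_append_ite, hcells, List.nil_append]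
    apply List.filter_eq_self.mpr
    intro rc hrc
    have hnot : rc ∉ stonesL board := by rw [hs]; simp
    unfold stonesL at hnot
    simp only [List.mem_filter, hrc, true_and] at hnot
    simpa using hnot
  · rw [if_neg hs, if_neg hs]
    have hminr : (stonesL board).foldl (fun m ab => min m ab.1) (board.length : Int)
        = (PySem.List.min? ((stonesL board).map (fun s : Int × Int => s.1)) (fun x => x)).getD 0 := by
      rw [← foldl_min_init _ _ (by simpa using hs) (stones_map_fst_le board), List.foldl_map]
    have hmaxr : (stonesL board).foldl (fun m ab => max m ab.1) (-1 : Int)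
        = (PySem.List.max? ((stonesL board).map (fun s : Int × Int => s.1)) (fun x => x)).getD 0 := by
      rw [← foldl_max_init _ _ (by simpa using hs) (stones_map_fst_ge board), List.foldl_map]
    have hminc : (stonesL board).foldl (fun m ab => min m ab.2) (board.length : Int)
        = (PySem.List.min? ((stonesL board).map (fun s : Int × Int => s.2)) (fun x => x)).getD 0 := by
      rw [← foldl_min_init _ _ (by simpa using hs) (stones_map_snd_le board), List.foldl_map]
    have hmaxc : (stonesL board).foldl (fun m ab => max m ab.2) (-1 : Int)
        = (PySem.List.max? ((stonesL board).map (fun s : Int × Int => s.2)) (fun x => x)).getD 0 := by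
      rw [← foldl_max_init _ _ (by simpa using hs) (stones_map_snd_ge board), List.foldl_map]
    rw [hminr, hmaxr, hminc, hmaxc]
    rw [foldl_nested, foldl_append_ite, List.nil_append]
    rfl

def rowminB (board : List (List Int)) : List (List (Option Int)) :=
  (PySem.List.pyRange 0 (board.length : Int) 1).map (fun r =>
    pvTransform ((PySem.List.pyRange 0 (board.length : Int) 1).map (fun c =>
      if PySem.List.pyGetD (PySem.List.pyGetD board r []) c 0 = 1 then some 0 else none)))

def colminB (board : List (List Int)) : List (List (Option Int)) :=
  (PySem.List.pyRange 0 (board.length : Int) 1).map (fun c =>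
    pvTransform ((PySem.List.pyRange 0 (board.length : Int) 1).map (fun r =>
      PySem.List.pyGetD (PySem.List.pyGetD (rowminB board) r []) c none)))

def keyB (board : List (List Int)) (m : Int × Int) : Int :=
  (PySem.List.pyGetD (PySem.List.pyGetD (colminB board) m.2 []) m.1 none).getD 0

theorem B_canon (board : List (List Int)) (radius : Int) :
    generate_legal_moves_alt board radius =
      if stonesL board = [] then pcells board
      else if (stonesL board).any (fun s => decide (pcell board s = 1)) then
        PySem.List.sorted (movesL board radius) (keyB board) false
      else PySem.List.sorted (movesL board radius) keyC false := by
  unfold generate_legal_moves_alt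
  dsimp only
  have hstones : List.flatMap (fun r =>
      List.map (fun c => (r, c))
        (List.filter (fun c => decide (PySem.List.pyGetD (PySem.List.pyGetD board r []) c 0 ≠ 0))
          (PySem.List.pyRange 0 (board.length : Int))))
      (PySem.List.pyRange 0 (board.length : Int)) = stonesL board := by
    unfold stonesL pcells
    rw [List.filter_flatMap]
    simp only [List.filter_map, Function.comp_def, pcell]
    rfl
  rw [hstones]
  by_cases hs : stonesL board = []
  · rw [if_pos hs, if_pos hs]
    rfl
  · rw [if_neg hs, if_neg hs]
    have hmoves : movesL board radius = List.flatMap (fun r =>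
        List.map (fun c => (r, c))
          (List.filter (fun c => decide (PySem.List.pyGetD (PySem.List.pyGetD board r []) c 0 = 0))
            (PySem.List.pyRange
              (max 0 ((PySem.List.min? ((stonesL board).map (fun s : Int × Int => s.2)) (fun x => x)).getD 0 - radius))
              (min ((board.length : Int) - 1)
                ((PySem.List.max? ((stonesL board).map (fun s : Int × Int => s.2)) (fun x => x)).getD 0 + radius) + 1))))
        (PySem.List.pyRange
          (max 0 ((PySem.List.min? ((stonesL board).map (fun s : Int × Int => s.1)) (fun x => x)).getD 0 - radius))
          (min ((board.length : Int) - 1)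
            ((PySem.List.max? ((stonesL board).map (fun s : Int × Int => s.1)) (fun x => x)).getD 0 + radius) + 1)) := by
      unfold movesL loR hiR loC hiC
      rw [List.filter_flatMap]
      simp only [List.filter_map, Function.comp_def, pcell]
      rfl
    rw [hmoves]
    rfl

theorem pcell_toNat (board : List (List Int)) (a b : Int) (ha : 0 ≤ a) (hb : 0 ≤ b) :
    pcell board (a, b) = cellN board a.toNat b.toNat := by
  unfold pcell cellN
  rw [show a = ((a.toNat : Nat) : Int) from (Int.toNat_of_nonneg ha).symm,
      show b = ((b.toNat : Nat) : Int) from (Int.toNat_of_nonneg hb).symm,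
      PySem.List.pyGetD_natCast, PySem.List.pyGetD_natCast]
  simp only [Int.toNat_natCast]

theorem rowminB_eq (board : List (List Int)) :
    rowminB board = (List.range board.length).map (fun r => rowT board r) := by
  unfold rowminB
  rw [PySem.List.pyRange_zero_nat, List.map_map]
  refine List.map_congr_left (fun k _ => ?_)
  simp only [Function.comp_apply]
  unfold rowT srcRow
  refine congrArg pvTransform ?_
  rw [List.map_map]
  refine List.map_congr_left (fun c _ => ?_)
  simp only [Function.comp_apply, PySem.List.pyGetD_natCast, cellN]
  exact if_congr Iff.rfl rfl rfl

theorem colminB_eq (board : List (List Int)) :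
    colminB board = (List.range board.length).map (fun c => colT board c) := by
  unfold colminB
  rw [PySem.List.pyRange_zero_nat, List.map_map]
  refine List.map_congr_left (fun c _ => ?_)
  simp only [Function.comp_apply]
  unfold colT
  refine congrArg pvTransform ?_
  rw [List.map_map]
  refine List.map_congr_left (fun r hr => ?_)
  rw [List.mem_range] at hr
  simp only [Function.comp_apply, PySem.List.pyGetD_natCast, rowminB_eq]
  rw [getD_map_range _ _ _ _ hr]

theorem keyB_eq (board : List (List Int)) (m : Int × Int)
    (h1 : 0 ≤ m.1) (h2 : m.1 < (board.length : Int)) (h3 : 0 ≤ m.2) (h4 : m.2 < (board.length : Int)) :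
    keyB board m = ((colT board m.2.toNat).getD m.1.toNat none).getD 0 := by
  unfold keyB
  rw [colminB_eq]
  rw [← Int.toNat_of_nonneg h3, ← Int.toNat_of_nonneg h1]
  simp only [PySem.List.pyGetD_natCast]
  rw [getD_map_range _ _ _ _ (by omega : m.2.toNat < board.length)]
  simp only [Int.toNat_natCast]

theorem mem_oppL_iff (board : List (List Int)) (r c : Nat)
    (hr : r < board.length) (hc : c < board.length) (x : Int) :
    (x ∈ (oppL board).map (fun (oc : Int × Int) => |((r : Int), (c : Int)).1 - oc.1| + |((r : Int), (c : Int)).2 - oc.2|))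
    ↔ (∃ a, a < board.length ∧ ∃ b, b < board.length ∧ cellN board a b = 1 ∧
        x = |(r : Int) - (a : Int)| + |(c : Int) - (b : Int)|) := by
  rw [List.mem_map]
  constructor
  · rintro ⟨oc, hoc, rfl⟩
    unfold oppL at hoc
    rw [List.mem_filter] at hoc
    obtain ⟨hmem, hval⟩ := hoc
    have hb := (mem_pcells board oc).mp hmem
    have hcell : pcell board oc = 1 := by simpa using hval
    refine ⟨oc.1.toNat, by omega, oc.2.toNat, by omega, ?_, ?_⟩
    · rw [← pcell_toNat board oc.1 oc.2 (by omega) (by omega)]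
      exact hcell
    · rw [Int.toNat_of_nonneg (by omega : (0:Int) ≤ oc.1), Int.toNat_of_nonneg (by omega : (0:Int) ≤ oc.2)]
  · rintro ⟨a, ha, b, hb, hcell, rfl⟩
    refine ⟨((a : Int), (b : Int)), ?_, by simp⟩
    unfold oppL
    rw [List.mem_filter]
    constructor
    · exact (mem_pcells board _).mpr (by simp; omega)
    · have : pcell board ((a : Int), (b : Int)) = 1 := by
        rw [pcell_toNat board _ _ (by omega) (by omega)]
        simpa using hcell
      simpa using this

theorem key_eq (board : List (List Int)) (m : Int × Int)
    (h1 : 0 ≤ m.1) (h2 : m.1 < (board.length : Int)) (h3 : 0 ≤ m.2) (h4 : m.2 < (board.length : Int)) :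
    keyA board m = keyB board m := by
  have hr : m.1.toNat < board.length := by omega
  have hc : m.2.toNat < board.length := by omega
  have hcol := col_isMin board m.1.toNat m.2.toNat hr hc
  have hmin := min?_id_isMin ((oppL board).map (fun (oc : Int × Int) => |m.1 - oc.1| + |m.2 - oc.2|))
  have hm1 : m.1 = ((m.1.toNat : Nat) : Int) := (Int.toNat_of_nonneg h1).symm
  have hm2 : m.2 = ((m.2.toNat : Nat) : Int) := (Int.toNat_of_nonneg h3).symm
  have hmin' : IsMinOf (PySem.List.min? ((oppL board).map (fun (oc : Int × Int) => |m.1 - oc.1| + |m.2 - oc.2|)) (fun x => x))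
      (fun x => ∃ a, a < board.length ∧ ∃ b, b < board.length ∧ cellN board a b = 1 ∧
        x = |((m.1.toNat : Nat) : Int) - (a : Int)| + |((m.2.toNat : Nat) : Int) - (b : Int)|) := by
    refine IsMinOf_congr (fun x => ?_) hmin
    rw [← mem_oppL_iff board m.1.toNat m.2.toNat hr hc x]
    rw [← hm1, ← hm2]
  have := IsMinOf_unique hmin' hcol
  unfold keyA
  rw [keyB_eq board m h1 h2 h3 h4, this]

theorem branch_iff (board : List (List Int)) :
    (oppL board ≠ []) ↔ ((stonesL board).any (fun s => decide (pcell board s = 1)) = true) := by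
  rw [List.any_eq_true]
  constructor
  · intro h
    obtain ⟨rc, hrc⟩ := List.exists_mem_of_ne_nil _ h
    unfold oppL at hrc
    rw [List.mem_filter] at hrc
    obtain ⟨hmem, hval⟩ := hrc
    have h1 : pcell board rc = 1 := by simpa using hval
    refine ⟨rc, ?_, by simpa using h1⟩
    unfold stonesL
    rw [List.mem_filter]
    exact ⟨hmem, by simp [h1]⟩
  · rintro ⟨rc, hrc, hval⟩
    unfold stonesL at hrc
    rw [List.mem_filter] at hrc
    intro hnil
    have : rc ∈ oppL board := by
      unfold oppL
      rw [List.mem_filter]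
      exact ⟨hrc.1, hval⟩
    rw [hnil] at this
    simp at this

theorem moves_bounds (board : List (List Int)) (radius : Int) (rc : Int × Int)
    (h : rc ∈ movesL board radius) :
    0 ≤ rc.1 ∧ rc.1 < (board.length : Int) ∧ 0 ≤ rc.2 ∧ rc.2 < (board.length : Int) := by
  unfold movesL at h
  have h1 := List.mem_of_mem_filter h
  rw [List.mem_flatMap] at h1
  obtain ⟨r, hr, h2⟩ := h1
  rw [List.mem_map] at h2
  obtain ⟨c, hc, rfl⟩ := h2
  rw [PySem.List.mem_pyRange_one] at hr hc
  unfold loR hiR at hr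
  unfold loC hiC at hc
  constructor
  · omega
  constructor
  · omega
  constructor
  · omega
  · omega

theorem main_eq (board : List (List Int)) (radius : Int) :
    generate_legal_moves board radius = generate_legal_moves_alt board radius := by
  rw [A_canon, B_canon]
  by_cases hs : stonesL board = []
  · rw [if_pos hs, if_pos hs]
  · rw [if_neg hs, if_neg hs]
    by_cases hx : (stonesL board).any (fun s => decide (pcell board s = 1)) = true
    · rw [if_pos ((branch_iff board).mpr hx), if_pos hx]
      refine sorted_congr _ _ _ (fun m hm => ?_)
      obtain ⟨h1, h2, h3, h4⟩ := moves_bounds board radius m hm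
      exact key_eq board m h1 h2 h3 h4
    · rw [if_neg (fun hh => hx ((branch_iff board).mp hh)), if_neg hx]

-- ===== VERDICT (by name: the statement is the Claim_ definition above) =====
theorem generate_legal_moves_spec : Claim_equal_generate_legal_moves := by
  intro board radius _ _
  unfold Spec_generate_legal_moves
  exact main_eq board radius
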